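-- pv_equiv track=rewrite | github.com/Marcosbc05/Fundamentos-Python | 4/9.py | cinco_vocales_unicas
-- ===== SOURCE A (Python) =====
-- def cinco_vocales_unicas(palabra):
--     a=True
--     palabra.lower()
--     vocales='aeiou'
--     contador=[0]*5
--     for i in range(len(palabra)):
--         if palabra[i] in vocales:
--             pos=vocales.index(palabra[i])
--             contador[pos]+=1
--     if contador!=[1,1,1,1,1]:
--         a=False
--     return a
-- ===== SOURCE B (Python) =====
-- def cinco_vocales_unicas(palabra):
--     return all(palabra.count(v) == 1 for v in 'aeiou')
-- ===== Notes on version B (the rewrite author's own statement) =====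
-- stated objective: idiomatic
-- what changed: Instead of one interpreted pass over the word building a 5-slot histogram via index lookups and comparing it to [1,1,1,1,1], B loops over the five vowels and requires each to occur exactly once via str.count; case-sensitivity is preserved (A's lower() result is discarded).
import Mathlib
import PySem

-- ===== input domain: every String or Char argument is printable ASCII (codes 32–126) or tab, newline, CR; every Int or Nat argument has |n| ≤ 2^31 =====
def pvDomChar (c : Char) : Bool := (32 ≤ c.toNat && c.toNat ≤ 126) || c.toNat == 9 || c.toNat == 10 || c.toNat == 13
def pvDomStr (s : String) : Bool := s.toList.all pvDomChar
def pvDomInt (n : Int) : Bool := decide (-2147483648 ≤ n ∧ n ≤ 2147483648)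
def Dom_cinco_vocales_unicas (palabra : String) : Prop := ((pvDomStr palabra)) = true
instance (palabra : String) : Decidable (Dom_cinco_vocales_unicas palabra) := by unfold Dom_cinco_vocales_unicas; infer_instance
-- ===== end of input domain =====

-- B replaces A's single-pass 5-slot histogram (index lookup + list update, then compare
-- to [1,1,1,1,1]) with the idiomatic `all(palabra.count(v) == 1 for v in 'aeiou')`;
-- case-sensitivity kept (A discards its lower() result).

-- ===== PORT A =====
-- the loop body: `if palabra[i] in vocales: pos = vocales.index(palabra[i]); contador[pos] += 1`
-- (1-char substring membership/index on the string 'aeiou' is exactly char membership/index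
--  in its char list; .index never raises here, guarded by the membership test)
def pasoA (contador : List Int) (c : Char) : List Int :=
  let vocales := "aeiou".toList
  if vocales.contains c then
    let pos := ((PySem.List.index? vocales c).getD 0 : Int)
    PySem.List.pySetD contador pos (PySem.List.pyGetD contador pos 0 + 1)
  else contador

def cinco_vocales_unicas (palabra : String) : Bool :=
  let a := true
  let _ := PySem.Str.lower palabra   -- result discarded, as in A
  let contador : List Int := List.replicate 5 0
  -- for i in range(len(palabra)): … palabra[i] …  (i always in range, so pyGetD is exact)
  let contador := (PySem.List.pyRange 0 (PySem.Str.len palabra) 1).foldl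
    (fun contador i => pasoA contador (PySem.List.pyGetD palabra.toList i ' ')) contador
  if contador ≠ ([1, 1, 1, 1, 1] : List Int) then false else a

-- ===== PORT B =====
-- all(palabra.count(v) == 1 for v in 'aeiou'); count of a 1-char string = char count (exact)
def cinco_vocales_unicas_alt (palabra : String) : Bool :=
  "aeiou".toList.all (fun v => palabra.toList.count v == 1)

-- ===== PRECONDITION & SPEC =====
def Spec_cinco_vocales_unicas (palabra : String) (out : Bool) : Prop := out = cinco_vocales_unicas_alt palabra
instance (palabra : String) (out : Bool) : Decidable (Spec_cinco_vocales_unicas palabra out) := by unfold Spec_cinco_vocales_unicas; infer_instance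

-- ===== CLAIM (what is proved, stated in full; the proofs are below) =====
def Claim_equal_cinco_vocales_unicas : Prop := ∀ (palabra : String), Dom_cinco_vocales_unicas palabra → Spec_cinco_vocales_unicas palabra (cinco_vocales_unicas palabra)

-- ===== LEMMAS AND PROOFS =====

-- the histogram invariant: folding A's loop body over any char list adds each vowel's count to its slot
lemma foldl_pasoA (l : List Char) (x0 x1 x2 x3 x4 : Int) :
    l.foldl pasoA [x0, x1, x2, x3, x4] =
      [x0 + l.count 'a', x1 + l.count 'e', x2 + l.count 'i',
       x3 + l.count 'o', x4 + l.count 'u'] := by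
  induction l generalizing x0 x1 x2 x3 x4 with
  | nil => simp
  | cons c t ih =>
    by_cases h1 : c = 'a'
    · subst h1
      have hp : pasoA [x0,x1,x2,x3,x4] 'a' = [x0+1,x1,x2,x3,x4] := by
        simp [pasoA, PySem.List.pySetD, PySem.List.pySet?, PySem.List.pyGetD,
              PySem.List.pyGet?, PySem.List.pyIdx?]
      rw [List.foldl_cons, hp, ih]; simp; omega
    · by_cases h2 : c = 'e'
      · subst h2
        have hp : pasoA [x0,x1,x2,x3,x4] 'e' = [x0,x1+1,x2,x3,x4] := by
          simp [pasoA, PySem.List.pySetD, PySem.List.pySet?, PySem.List.pyGetD,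
                PySem.List.pyGet?, PySem.List.pyIdx?,
                show List.idxOf? 'e' ['a','e','i','o','u'] = some 1 from by decide]
        rw [List.foldl_cons, hp, ih]; simp; omega
      · by_cases h3 : c = 'i'
        · subst h3
          have hp : pasoA [x0,x1,x2,x3,x4] 'i' = [x0,x1,x2+1,x3,x4] := by
            simp [pasoA, PySem.List.pySetD, PySem.List.pySet?, PySem.List.pyGetD,
                  PySem.List.pyGet?, PySem.List.pyIdx?,
                  show List.idxOf? 'i' ['a','e','i','o','u'] = some 2 from by decide]
          rw [List.foldl_cons, hp, ih]; simp; omega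
        · by_cases h4 : c = 'o'
          · subst h4
            have hp : pasoA [x0,x1,x2,x3,x4] 'o' = [x0,x1,x2,x3+1,x4] := by
              simp [pasoA, PySem.List.pySetD, PySem.List.pySet?, PySem.List.pyGetD,
                    PySem.List.pyGet?, PySem.List.pyIdx?,
                    show List.idxOf? 'o' ['a','e','i','o','u'] = some 3 from by decide]
            rw [List.foldl_cons, hp, ih]; simp; omega
          · by_cases h5 : c = 'u'
            · subst h5
              have hp : pasoA [x0,x1,x2,x3,x4] 'u' = [x0,x1,x2,x3,x4+1] := by
                simp [pasoA, PySem.List.pySetD, PySem.List.pySet?, PySem.List.pyGetD,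
                      PySem.List.pyGet?, PySem.List.pyIdx?,
                      show List.idxOf? 'u' ['a','e','i','o','u'] = some 4 from by decide]
              rw [List.foldl_cons, hp, ih]; simp; omega
            · have hp : pasoA [x0,x1,x2,x3,x4] c = [x0,x1,x2,x3,x4] := by
                simp [pasoA, h1, h2, h3, h4, h5]
              rw [List.foldl_cons, hp, ih]
              simp [h1, h2, h3, h4, h5]

-- ===== VERDICT (by name: the statement is the Claim_ definition above) =====
theorem cinco_vocales_unicas_spec : Claim_equal_cinco_vocales_unicas := by
  intro palabra _
  unfold Spec_cinco_vocales_unicas cinco_vocales_unicas cinco_vocales_unicas_alt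
  have hfold := PySem.List.foldl_pyRange_zero_pyGetD' palabra.toList ' '
    (fun acc c => pasoA acc c) (List.replicate 5 0)
  simp only [PySem.Str.len_eq]
  simp only [hfold]
  have hrep : (List.replicate 5 (0 : Int)) = [0, 0, 0, 0, 0] := by decide
  rw [hrep, foldl_pasoA]
  by_cases hE : ([0 + (palabra.toList.count 'a' : Int), 0 + (palabra.toList.count 'e' : Int),
      0 + (palabra.toList.count 'i' : Int), 0 + (palabra.toList.count 'o' : Int),
      0 + (palabra.toList.count 'u' : Int)] = ([1, 1, 1, 1, 1] : List Int))
  · rw [if_neg (not_not.mpr hE)]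
    simp only [List.cons.injEq, and_true] at hE
    obtain ⟨e1, e2, e3, e4, e5⟩ := hE
    symm
    rw [show ("aeiou".toList) = ['a','e','i','o','u'] from by decide]
    simp only [List.all_cons, List.all_nil, Bool.and_true, Bool.and_eq_true, beq_iff_eq]
    refine ⟨?_, ?_, ?_, ?_, ?_⟩ <;> omega
  · rw [if_pos hE]
    symm
    rw [Bool.eq_false_iff]
    intro hb
    rw [show ("aeiou".toList) = ['a','e','i','o','u'] from by decide] at hb
    simp only [List.all_cons, List.all_nil, Bool.and_true, Bool.and_eq_true, beq_iff_eq] at hb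
    apply hE
    simp only [List.cons.injEq, and_true]
    obtain ⟨b1, b2, b3, b4, b5⟩ := hb
    refine ⟨?_, ?_, ?_, ?_, ?_⟩ <;> omega
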